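-- pv_equiv track=rewrite | github.com/sahandKashani/CUDA-multiprecision-arithmetic-code-generator | operation_generator.py | add_loc_exact_generic
-- ===== SOURCE A (Python) =====
-- import math
--
-- bits_per_word = 32
--
-- def number_of_words_needed_for_precision(precision):
--     return math.ceil(precision / bits_per_word)
--
-- def add_res_precision(op1_precision, op2_precision):
--     res_precision = max(op1_precision, op2_precision) + 1
--     return res_precision
--
-- def add_loc_exact_generic(op1_precision, op2_precision, op1_name, op2_name, res_name, op1_shift, op2_shift, res_shift, indent = 0):
--     res_precision = add_res_precision(op1_precision, op2_precision)
--     op1_number_of_words = number_of_words_needed_for_precision(op1_precision)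
--     op2_number_of_words = number_of_words_needed_for_precision(op2_precision)
--     res_number_of_words = number_of_words_needed_for_precision(res_precision)
--
--     smaller_number_of_words = min(op1_number_of_words, op2_number_of_words)
--     bigger_number_of_words = max(op1_number_of_words, op2_number_of_words)
--
--     if bigger_number_of_words == op1_number_of_words:
--         bigger_name = 'a_loc'
--         bigger_shift = op1_shift
--     else:
--         bigger_name = 'b_loc'
--         bigger_shift = op2_shift
--
--     asm = []
--
--     if res_number_of_words == 1:
--         asm.append('asm("add.u32     %0, %1, %2;" : "=r"(c_loc[' + str(res_shift) + ']) : "r"(a_loc[' + str(op1_shift) + ']), "r"(b_loc[' + str(op2_shift) + ']));\\')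
--
--     elif res_number_of_words > 1:
--         asm.append('asm("add.cc.u32  %0, %1, %2;" : "=r"(c_loc[' + str(res_shift) + ']) : "r"(a_loc[' + str(op1_shift) + ']), "r"(b_loc[' + str(op2_shift) + ']));\\')
--
--         if smaller_number_of_words == bigger_number_of_words == res_number_of_words:
--             for i in range(1, res_number_of_words):
--                 if i < res_number_of_words - 1:
--                     asm.append('asm("addc.cc.u32 %0, %1, %2;" : "=r"(c_loc[' + str(i + res_shift) + ']) : "r"(a_loc[' + str(i + op1_shift) + ']), "r"(b_loc[' + str(i + op2_shift) + ']));\\')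
--                 elif i == res_number_of_words - 1:
--                     asm.append('asm("addc.u32    %0, %1, %2;" : "=r"(c_loc[' + str(i + res_shift) + ']) : "r"(a_loc[' + str(i + op1_shift) + ']), "r"(b_loc[' + str(i + op2_shift) + ']));\\')
--
--         elif smaller_number_of_words < bigger_number_of_words == res_number_of_words:
--             for i in range(1, res_number_of_words):
--                 if i < smaller_number_of_words:
--                     asm.append('asm("addc.cc.u32 %0, %1, %2;" : "=r"(c_loc[' + str(i + res_shift) + ']) : "r"(a_loc[' + str(i + op1_shift) + ']), "r"(b_loc[' + str(i + op2_shift) + ']));\\')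
--                 elif i < res_number_of_words - 1:
--                     asm.append('asm("addc.cc.u32 %0, %1,  0;" : "=r"(c_loc[' + str(i + res_shift) + ']) : "r"(' + bigger_name + '[' + str(i + bigger_shift) + ']));\\')
--                 elif i == res_number_of_words - 1:
--                     asm.append('asm("addc.u32    %0, %1,  0;" : "=r"(c_loc[' + str(i + res_shift) + ']) : "r"(' + bigger_name + '[' + str(i + bigger_shift) + ']));\\')
--
--         # special case in like 32-bit + 32-bit = 33-bit
--         elif smaller_number_of_words <= bigger_number_of_words < res_number_of_words:
--             for i in range(1, res_number_of_words):
--                 if i < smaller_number_of_words: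
--                     asm.append('asm("addc.cc.u32 %0, %1, %2;" : "=r"(c_loc[' + str(i + res_shift) + ']) : "r"(a_loc[' + str(i + op1_shift) + ']), "r"(b_loc[' + str(i + op2_shift) + ']));\\')
--                 elif i < bigger_number_of_words:
--                     asm.append('asm("addc.cc.u32 %0, %1,  0;" : "=r"(c_loc[' + str(i + res_shift) + ']) : "r"(' + bigger_name + '[' + str(i + bigger_shift) + ']));\\')
--
--                 # res_number_of_words can be at most 1 bigger than
--                 # bigger_number_of_words, so we can just check if we have
--                 # reached (res_number_of_words - 1) instead of having to check
--                 # for (i < res_number_of_words)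
--                 elif i == res_number_of_words - 1:
--                     asm.append('asm("addc.u32    %0,  0,  0;" : "=r"(c_loc[' + str(i + res_shift) + ']) : );\\')
--
--
--     # replace all occurrences of a_loc, b_loc and c_loc by their appropriate
--     # names, as provided by the user.
--     for i in range(len(asm)):
--         asm[i] = " " * 4 * indent + asm[i].replace('a_loc', op1_name).replace('b_loc', op2_name).replace('c_loc', res_name)
--
--     return asm
-- ===== SOURCE B (Python) =====
-- import math
--
-- bits_per_word = 32
--
-- def number_of_words_needed_for_precision(precision):
--     return math.ceil(precision / bits_per_word)
--
-- def add_res_precision(op1_precision, op2_precision):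
--     return max(op1_precision, op2_precision) + 1
--
-- def _both(mn, r, a, b):
--     return 'asm("' + mn + '%0, %1, %2;" : "=r"(c_loc[' + str(r) + ']) : "r"(a_loc[' + str(a) + ']), "r"(b_loc[' + str(b) + ']));\\'
--
-- def _one(mn, r, name, s):
--     return 'asm("' + mn + '%0, %1,  0;" : "=r"(c_loc[' + str(r) + ']) : "r"(' + name + '[' + str(s) + ']));\\'
--
-- def _zero(r):
--     return 'asm("addc.u32    %0,  0,  0;" : "=r"(c_loc[' + str(r) + ']) : );\\'
--
-- def add_loc_exact_generic(op1_precision, op2_precision, op1_name, op2_name, res_name, op1_shift, op2_shift, res_shift, indent = 0):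
--     # Segmented construction: the head word, the middle words as two comprehensions over
--     # arithmetically clipped ranges (no conditionals inside), and the final carry word built
--     # separately.  Middle words always use the carry-propagating mnemonic; only the word at
--     # index n-1 can use a non-propagating one or the carry-only pattern.
--     n = number_of_words_needed_for_precision(add_res_precision(op1_precision, op2_precision))
--     w1 = number_of_words_needed_for_precision(op1_precision)
--     w2 = number_of_words_needed_for_precision(op2_precision)
--     smaller, bigger = min(w1, w2), max(w1, w2)
--     if bigger == w1:
--         bigger_name, bigger_shift = 'a_loc', op1_shift
--     else:
--         bigger_name, bigger_shift = 'b_loc', op2_shift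
--     asm = []
--     if n >= 1:
--         asm.append(_both('add.u32     ' if n == 1 else 'add.cc.u32  ', res_shift, op1_shift, op2_shift))
--         asm += [_both('addc.cc.u32 ', i + res_shift, i + op1_shift, i + op2_shift)
--                 for i in range(1, min(smaller, n - 1))]
--         asm += [_one('addc.cc.u32 ', i + res_shift, bigger_name, i + bigger_shift)
--                 for i in range(max(smaller, 1), min(bigger, n - 1))]
--         if n > 1:
--             i = n - 1
--             if i < smaller:
--                 asm.append(_both('addc.u32    ', i + res_shift, i + op1_shift, i + op2_shift))
--             elif i < bigger:
--                 asm.append(_one('addc.u32    ', i + res_shift, bigger_name, i + bigger_shift))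
--             else:
--                 asm.append(_zero(i + res_shift))
--     return [" " * 4 * indent + l.replace('a_loc', op1_name).replace('b_loc', op2_name).replace('c_loc', res_name) for l in asm]
-- ===== Notes on version B (the rewrite author's own statement) =====
-- stated objective: simpler
-- what changed: Replaces A's three regime-selected loops with per-index conditionals by a segmented construction: the head word, the middle words as two conditional-free comprehensions over arithmetically clipped ranges (min/max boundaries), and the final carry word built separately.
import Mathlib
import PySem

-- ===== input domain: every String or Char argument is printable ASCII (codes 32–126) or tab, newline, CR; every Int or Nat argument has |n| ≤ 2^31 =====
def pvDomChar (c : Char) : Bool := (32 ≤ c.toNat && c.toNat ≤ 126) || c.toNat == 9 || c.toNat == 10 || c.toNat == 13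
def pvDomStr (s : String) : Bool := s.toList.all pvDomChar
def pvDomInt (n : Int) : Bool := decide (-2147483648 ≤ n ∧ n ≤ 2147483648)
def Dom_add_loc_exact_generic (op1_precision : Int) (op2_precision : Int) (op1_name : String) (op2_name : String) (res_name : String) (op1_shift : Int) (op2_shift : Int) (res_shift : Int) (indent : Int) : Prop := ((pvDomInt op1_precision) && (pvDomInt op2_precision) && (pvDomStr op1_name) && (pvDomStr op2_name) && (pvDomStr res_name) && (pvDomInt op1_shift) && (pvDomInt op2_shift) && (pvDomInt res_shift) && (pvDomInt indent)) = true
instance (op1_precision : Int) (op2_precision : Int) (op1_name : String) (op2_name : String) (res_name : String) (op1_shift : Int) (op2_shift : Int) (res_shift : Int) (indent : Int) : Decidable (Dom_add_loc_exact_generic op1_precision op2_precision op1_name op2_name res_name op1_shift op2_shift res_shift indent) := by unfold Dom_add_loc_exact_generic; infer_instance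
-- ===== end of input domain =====

-- B replaces A's three regime-selected conditional loops by a segmented construction: head word,
-- middle words as two maps over arithmetically clipped ranges (no conditionals inside), and the
-- final carry word built separately; objective: simpler. Strings handled as List Char (PySem.Chars).

-- ===== PORT A =====
-- module helpers shared by both Python files
-- math.ceil(precision / 32): exact as ceiling division since |precision| ≤ 2^31 makes precision/32 an exact float
def number_of_words_needed_for_precision (precision : Int) : Int :=
  -(PySem.Int.floordiv (-precision) 32)

def add_res_precision (op1_precision : Int) (op2_precision : Int) : Int :=
  max op1_precision op2_precision + 1

def add_loc_exact_generic (op1_precision : Int) (op2_precision : Int) (op1_name : String) (op2_name : String) (res_name : String) (op1_shift : Int) (op2_shift : Int) (res_shift : Int) (indent : Int) : List String :=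
  let res_precision := add_res_precision op1_precision op2_precision
  let op1_number_of_words := number_of_words_needed_for_precision op1_precision
  let op2_number_of_words := number_of_words_needed_for_precision op2_precision
  let res_number_of_words := number_of_words_needed_for_precision res_precision
  let smaller_number_of_words := min op1_number_of_words op2_number_of_words
  let bigger_number_of_words := max op1_number_of_words op2_number_of_words
  let bigger_name : List Char := if bigger_number_of_words = op1_number_of_words then "a_loc".toList else "b_loc".toList
  let bigger_shift : Int := if bigger_number_of_words = op1_number_of_words then op1_shift else op2_shift
  let asm : List (List Char) :=
    if res_number_of_words = 1 then
      ["asm(\"add.u32     %0, %1, %2;\" : \"=r\"(c_loc[".toList ++ PySem.Int.toChars res_shift ++ "]) : \"r\"(a_loc[".toList ++ PySem.Int.toChars op1_shift ++ "]), \"r\"(b_loc[".toList ++ PySem.Int.toChars op2_shift ++ "]));\\".toList]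
    else if res_number_of_words > 1 then
      let asm0 : List (List Char) :=
        ["asm(\"add.cc.u32  %0, %1, %2;\" : \"=r\"(c_loc[".toList ++ PySem.Int.toChars res_shift ++ "]) : \"r\"(a_loc[".toList ++ PySem.Int.toChars op1_shift ++ "]), \"r\"(b_loc[".toList ++ PySem.Int.toChars op2_shift ++ "]));\\".toList]
      if smaller_number_of_words = bigger_number_of_words ∧ bigger_number_of_words = res_number_of_words then
        (PySem.List.pyRange 1 res_number_of_words 1).foldl (fun acc i =>
          if i < res_number_of_words - 1 then
            acc ++ ["asm(\"addc.cc.u32 %0, %1, %2;\" : \"=r\"(c_loc[".toList ++ PySem.Int.toChars (i + res_shift) ++ "]) : \"r\"(a_loc[".toList ++ PySem.Int.toChars (i + op1_shift) ++ "]), \"r\"(b_loc[".toList ++ PySem.Int.toChars (i + op2_shift) ++ "]));\\".toList]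
          else if i = res_number_of_words - 1 then
            acc ++ ["asm(\"addc.u32    %0, %1, %2;\" : \"=r\"(c_loc[".toList ++ PySem.Int.toChars (i + res_shift) ++ "]) : \"r\"(a_loc[".toList ++ PySem.Int.toChars (i + op1_shift) ++ "]), \"r\"(b_loc[".toList ++ PySem.Int.toChars (i + op2_shift) ++ "]));\\".toList]
          else acc) asm0
      else if smaller_number_of_words < bigger_number_of_words ∧ bigger_number_of_words = res_number_of_words then
        (PySem.List.pyRange 1 res_number_of_words 1).foldl (fun acc i =>
          if i < smaller_number_of_words then
            acc ++ ["asm(\"addc.cc.u32 %0, %1, %2;\" : \"=r\"(c_loc[".toList ++ PySem.Int.toChars (i + res_shift) ++ "]) : \"r\"(a_loc[".toList ++ PySem.Int.toChars (i + op1_shift) ++ "]), \"r\"(b_loc[".toList ++ PySem.Int.toChars (i + op2_shift) ++ "]));\\".toList]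
          else if i < res_number_of_words - 1 then
            acc ++ ["asm(\"addc.cc.u32 %0, %1,  0;\" : \"=r\"(c_loc[".toList ++ PySem.Int.toChars (i + res_shift) ++ "]) : \"r\"(".toList ++ bigger_name ++ "[".toList ++ PySem.Int.toChars (i + bigger_shift) ++ "]));\\".toList]
          else if i = res_number_of_words - 1 then
            acc ++ ["asm(\"addc.u32    %0, %1,  0;\" : \"=r\"(c_loc[".toList ++ PySem.Int.toChars (i + res_shift) ++ "]) : \"r\"(".toList ++ bigger_name ++ "[".toList ++ PySem.Int.toChars (i + bigger_shift) ++ "]));\\".toList]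
          else acc) asm0
      else if smaller_number_of_words ≤ bigger_number_of_words ∧ bigger_number_of_words < res_number_of_words then
        (PySem.List.pyRange 1 res_number_of_words 1).foldl (fun acc i =>
          if i < smaller_number_of_words then
            acc ++ ["asm(\"addc.cc.u32 %0, %1, %2;\" : \"=r\"(c_loc[".toList ++ PySem.Int.toChars (i + res_shift) ++ "]) : \"r\"(a_loc[".toList ++ PySem.Int.toChars (i + op1_shift) ++ "]), \"r\"(b_loc[".toList ++ PySem.Int.toChars (i + op2_shift) ++ "]));\\".toList]
          else if i < bigger_number_of_words then
            acc ++ ["asm(\"addc.cc.u32 %0, %1,  0;\" : \"=r\"(c_loc[".toList ++ PySem.Int.toChars (i + res_shift) ++ "]) : \"r\"(".toList ++ bigger_name ++ "[".toList ++ PySem.Int.toChars (i + bigger_shift) ++ "]));\\".toList]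
          else if i = res_number_of_words - 1 then
            acc ++ ["asm(\"addc.u32    %0,  0,  0;\" : \"=r\"(c_loc[".toList ++ PySem.Int.toChars (i + res_shift) ++ "]) : );\\".toList]
          else acc) asm0
      else asm0
    else []
  asm.map (fun l => String.ofList (List.replicate (4 * indent).toNat ' ' ++ PySem.Chars.replace (PySem.Chars.replace (PySem.Chars.replace l "a_loc".toList op1_name.toList) "b_loc".toList op2_name.toList) "c_loc".toList res_name.toList))

-- ===== PORT B =====
def pvBoth (mn : List Char) (r : Int) (a : Int) (b : Int) : List Char :=
  "asm(\"".toList ++ mn ++ "%0, %1, %2;\" : \"=r\"(c_loc[".toList ++ PySem.Int.toChars r ++ "]) : \"r\"(a_loc[".toList ++ PySem.Int.toChars a ++ "]), \"r\"(b_loc[".toList ++ PySem.Int.toChars b ++ "]));\\".toList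

def pvOne (mn : List Char) (r : Int) (name : List Char) (s : Int) : List Char :=
  "asm(\"".toList ++ mn ++ "%0, %1,  0;\" : \"=r\"(c_loc[".toList ++ PySem.Int.toChars r ++ "]) : \"r\"(".toList ++ name ++ "[".toList ++ PySem.Int.toChars s ++ "]));\\".toList

def pvZero (r : Int) : List Char :=
  "asm(\"addc.u32    %0,  0,  0;\" : \"=r\"(c_loc[".toList ++ PySem.Int.toChars r ++ "]) : );\\".toList

def add_loc_exact_generic_alt (op1_precision : Int) (op2_precision : Int) (op1_name : String) (op2_name : String) (res_name : String) (op1_shift : Int) (op2_shift : Int) (res_shift : Int) (indent : Int) : List String :=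
  let n := number_of_words_needed_for_precision (add_res_precision op1_precision op2_precision)
  let w1 := number_of_words_needed_for_precision op1_precision
  let w2 := number_of_words_needed_for_precision op2_precision
  let smaller := min w1 w2
  let bigger := max w1 w2
  let bigger_name : List Char := if bigger = w1 then "a_loc".toList else "b_loc".toList
  let bigger_shift : Int := if bigger = w1 then op1_shift else op2_shift
  let asm : List (List Char) :=
    if n ≥ 1 then
      [pvBoth (if n = 1 then "add.u32     ".toList else "add.cc.u32  ".toList) res_shift op1_shift op2_shift]
      ++ (PySem.List.pyRange 1 (min smaller (n - 1)) 1).map (fun i =>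
            pvBoth "addc.cc.u32 ".toList (i + res_shift) (i + op1_shift) (i + op2_shift))
      ++ (PySem.List.pyRange (max smaller 1) (min bigger (n - 1)) 1).map (fun i =>
            pvOne "addc.cc.u32 ".toList (i + res_shift) bigger_name (i + bigger_shift))
      ++ (if n > 1 then
            if n - 1 < smaller then
              [pvBoth "addc.u32    ".toList (n - 1 + res_shift) (n - 1 + op1_shift) (n - 1 + op2_shift)]
            else if n - 1 < bigger then
              [pvOne "addc.u32    ".toList (n - 1 + res_shift) bigger_name (n - 1 + bigger_shift)]
            else
              [pvZero (n - 1 + res_shift)]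
          else [])
    else []
  asm.map (fun l => String.ofList (List.replicate (4 * indent).toNat ' ' ++ PySem.Chars.replace (PySem.Chars.replace (PySem.Chars.replace l "a_loc".toList op1_name.toList) "b_loc".toList op2_name.toList) "c_loc".toList res_name.toList))

-- ===== PRECONDITION & SPEC =====
def Spec_add_loc_exact_generic (op1_precision : Int) (op2_precision : Int) (op1_name : String) (op2_name : String) (res_name : String) (op1_shift : Int) (op2_shift : Int) (res_shift : Int) (indent : Int) (out : List String) : Prop := out = add_loc_exact_generic_alt op1_precision op2_precision op1_name op2_name res_name op1_shift op2_shift res_shift indent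
instance (op1_precision : Int) (op2_precision : Int) (op1_name : String) (op2_name : String) (res_name : String) (op1_shift : Int) (op2_shift : Int) (res_shift : Int) (indent : Int) (out : List String) : Decidable (Spec_add_loc_exact_generic op1_precision op2_precision op1_name op2_name res_name op1_shift op2_shift res_shift indent out) := by unfold Spec_add_loc_exact_generic; infer_instance

-- ===== CLAIM (what is proved, stated in full; the proofs are below) =====
def Claim_equal_add_loc_exact_generic : Prop := ∀ (op1_precision : Int) (op2_precision : Int) (op1_name : String) (op2_name : String) (res_name : String) (op1_shift : Int) (op2_shift : Int) (res_shift : Int) (indent : Int), Dom_add_loc_exact_generic op1_precision op2_precision op1_name op2_name res_name op1_shift op2_shift res_shift indent → Spec_add_loc_exact_generic op1_precision op2_precision op1_name op2_name res_name op1_shift op2_shift res_shift indent (add_loc_exact_generic op1_precision op2_precision op1_name op2_name res_name op1_shift op2_shift res_shift indent)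

-- ===== LEMMAS AND PROOFS =====

lemma words_eq (p : Int) : number_of_words_needed_for_precision p = -((-p) / 32) := by
  unfold number_of_words_needed_for_precision
  rw [PySem.Int.floordiv_eq_ediv_of_pos (by norm_num)]

lemma words_bounds (p q : Int) :
    max (number_of_words_needed_for_precision p) (number_of_words_needed_for_precision q) ≤
      number_of_words_needed_for_precision (add_res_precision p q) ∧
    number_of_words_needed_for_precision (add_res_precision p q) ≤
      max (number_of_words_needed_for_precision p) (number_of_words_needed_for_precision q) + 1 := by
  unfold add_res_precision
  rw [words_eq, words_eq, words_eq]
  rcases le_total p q with h | h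
  · rw [max_eq_right h, max_eq_right (show -(-p / 32) ≤ -(-q / 32) by omega)]
    constructor <;> omega
  · rw [max_eq_left h, max_eq_left (show -(-q / 32) ≤ -(-p / 32) by omega)]
    constructor <;> omega

lemma pvBoth_eq (mn pre : List Char)
    (h : "asm(\"".toList ++ mn ++ "%0, %1, %2;\" : \"=r\"(c_loc[".toList = pre) (r a b : Int) :
    pvBoth mn r a b = pre ++ PySem.Int.toChars r ++ "]) : \"r\"(a_loc[".toList ++ PySem.Int.toChars a ++ "]), \"r\"(b_loc[".toList ++ PySem.Int.toChars b ++ "]));\\".toList := by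
  subst h; unfold pvBoth; simp [List.append_assoc]

lemma pvOne_eq (mn pre : List Char)
    (h : "asm(\"".toList ++ mn ++ "%0, %1,  0;\" : \"=r\"(c_loc[".toList = pre) (r : Int) (name : List Char) (s : Int) :
    pvOne mn r name s = pre ++ PySem.Int.toChars r ++ "]) : \"r\"(".toList ++ name ++ "[".toList ++ PySem.Int.toChars s ++ "]));\\".toList := by
  subst h; unfold pvOne; simp [List.append_assoc]

lemma midsplit (n s : Int) (hs : s ≤ n - 1) :
    PySem.List.pyRange 1 (n - 1) 1 =
      PySem.List.pyRange 1 (min s (n - 1)) 1 ++ PySem.List.pyRange (max s 1) (n - 1) 1 := by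
  by_cases h : 1 ≤ s
  · rw [min_eq_left hs, max_eq_left h]
    exact PySem.List.pyRange_one_append 1 s (n - 1) h hs
  · rw [PySem.List.pyRange_one_eq_nil (show min s (n - 1) ≤ 1 by omega),
      max_eq_right (by omega : s ≤ 1)]
    simp

lemma zone1 {α : Type} (n : Int) (hn : 2 ≤ n) (F L : Int → α) (init : List α) :
    (PySem.List.pyRange 1 n 1).foldl
      (fun acc i => if i < n - 1 then acc ++ [F i] else if i = n - 1 then acc ++ [L i] else acc) init
    = init ++ (PySem.List.pyRange 1 (n - 1) 1).map F ++ [L (n - 1)] := by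
  have hsplit : PySem.List.pyRange 1 n 1 = PySem.List.pyRange 1 (n - 1) 1 ++ [n - 1] := by
    conv_lhs => rw [show n = (n - 1) + 1 by ring]
    exact PySem.List.pyRange_one_succ_right (by omega)
  have hc : ∀ acc, ∀ x ∈ PySem.List.pyRange 1 (n - 1) 1,
      (fun acc i => if i < n - 1 then acc ++ [F i] else if i = n - 1 then acc ++ [L i] else acc) acc x
        = (fun acc i => acc ++ [F i]) acc x := by
    intro acc x hx
    rw [PySem.List.mem_pyRange_one] at hx
    simp only
    rw [if_pos (by omega)]
  rw [hsplit, List.foldl_append, PySem.List.foldl_congr_mem _ _ _ _ hc,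
    PySem.List.foldl_append_singleton_eq_map]
  simp only [List.foldl_cons, List.foldl_nil]
  rw [if_neg (by omega : ¬ (n-1:Int) < n - 1)]
  simp

lemma zone2 {α : Type} (n s : Int) (hn : 2 ≤ n) (hs : s ≤ n - 1) (F G L : Int → α) (init : List α) :
    (PySem.List.pyRange 1 n 1).foldl
      (fun acc i => if i < s then acc ++ [F i]
        else if i < n - 1 then acc ++ [G i]
        else if i = n - 1 then acc ++ [L i] else acc) init
    = init ++ (PySem.List.pyRange 1 (min s (n - 1)) 1).map F
        ++ (PySem.List.pyRange (max s 1) (n - 1) 1).map G ++ [L (n - 1)] := by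
  have hsplit : PySem.List.pyRange 1 n 1 = PySem.List.pyRange 1 (n - 1) 1 ++ [n - 1] := by
    conv_lhs => rw [show n = (n - 1) + 1 by ring]
    exact PySem.List.pyRange_one_succ_right (by omega)
  have hcF : ∀ acc, ∀ x ∈ PySem.List.pyRange 1 (min s (n - 1)) 1,
      (fun acc i => if i < s then acc ++ [F i]
        else if i < n - 1 then acc ++ [G i]
        else if i = n - 1 then acc ++ [L i] else acc) acc x
        = (fun acc i => acc ++ [F i]) acc x := by
    intro acc x hx
    rw [PySem.List.mem_pyRange_one] at hx
    simp only
    rw [if_pos (by omega)]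
  have hcG : ∀ acc, ∀ x ∈ PySem.List.pyRange (max s 1) (n - 1) 1,
      (fun acc i => if i < s then acc ++ [F i]
        else if i < n - 1 then acc ++ [G i]
        else if i = n - 1 then acc ++ [L i] else acc) acc x
        = (fun acc i => acc ++ [G i]) acc x := by
    intro acc x hx
    rw [PySem.List.mem_pyRange_one] at hx
    simp only
    rw [if_neg (by omega), if_pos (by omega)]
  rw [hsplit, List.foldl_append, midsplit n s hs, List.foldl_append,
    PySem.List.foldl_congr_mem _ _ _ _ hcF, PySem.List.foldl_append_singleton_eq_map,
    PySem.List.foldl_congr_mem _ _ _ _ hcG, PySem.List.foldl_append_singleton_eq_map]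
  simp only [List.foldl_cons, List.foldl_nil]
  rw [if_neg (by omega : ¬ (n-1:Int) < s), if_neg (by omega : ¬ (n-1:Int) < n - 1)]
  simp [List.append_assoc]

lemma zone3 {α : Type} (n s m : Int) (hn : 2 ≤ n) (hs : s ≤ n - 1) (hm : m = n - 1)
    (F G L : Int → α) (init : List α) :
    (PySem.List.pyRange 1 n 1).foldl
      (fun acc i => if i < s then acc ++ [F i]
        else if i < m then acc ++ [G i]
        else if i = n - 1 then acc ++ [L i] else acc) init
    = init ++ (PySem.List.pyRange 1 (min s (n - 1)) 1).map F
        ++ (PySem.List.pyRange (max s 1) (n - 1) 1).map G ++ [L (n - 1)] := by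
  subst hm
  exact zone2 n s hn hs F G L init

-- ===== VERDICT (by name: the statement is the Claim_ definition above) =====
theorem add_loc_exact_generic_spec : Claim_equal_add_loc_exact_generic := by
  intro p1 p2 n1 n2 n3 s1 s2 s3 ind _hdom
  unfold Spec_add_loc_exact_generic add_loc_exact_generic add_loc_exact_generic_alt
  dsimp only
  obtain ⟨h1, h2⟩ := words_bounds p1 p2
  set w1 := number_of_words_needed_for_precision p1 with hw1
  set w2 := number_of_words_needed_for_precision p2 with hw2
  set n := number_of_words_needed_for_precision (add_res_precision p1 p2) with hn
  set s := min w1 w2 with hsdef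
  set b := max w1 w2 with hbdef
  have hsb : s ≤ b := min_le_max
  have eAdd : ∀ r a c : Int, pvBoth "add.u32     ".toList r a c =
      "asm(\"add.u32     %0, %1, %2;\" : \"=r\"(c_loc[".toList ++ PySem.Int.toChars r ++ "]) : \"r\"(a_loc[".toList ++ PySem.Int.toChars a ++ "]), \"r\"(b_loc[".toList ++ PySem.Int.toChars c ++ "]));\\".toList :=
    pvBoth_eq _ _ (by decide)
  have eAddCC : ∀ r a c : Int, pvBoth "add.cc.u32  ".toList r a c =
      "asm(\"add.cc.u32  %0, %1, %2;\" : \"=r\"(c_loc[".toList ++ PySem.Int.toChars r ++ "]) : \"r\"(a_loc[".toList ++ PySem.Int.toChars a ++ "]), \"r\"(b_loc[".toList ++ PySem.Int.toChars c ++ "]));\\".toList :=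
    pvBoth_eq _ _ (by decide)
  have eCCB : ∀ r a c : Int, pvBoth "addc.cc.u32 ".toList r a c =
      "asm(\"addc.cc.u32 %0, %1, %2;\" : \"=r\"(c_loc[".toList ++ PySem.Int.toChars r ++ "]) : \"r\"(a_loc[".toList ++ PySem.Int.toChars a ++ "]), \"r\"(b_loc[".toList ++ PySem.Int.toChars c ++ "]));\\".toList :=
    pvBoth_eq _ _ (by decide)
  have eLB : ∀ r a c : Int, pvBoth "addc.u32    ".toList r a c =
      "asm(\"addc.u32    %0, %1, %2;\" : \"=r\"(c_loc[".toList ++ PySem.Int.toChars r ++ "]) : \"r\"(a_loc[".toList ++ PySem.Int.toChars a ++ "]), \"r\"(b_loc[".toList ++ PySem.Int.toChars c ++ "]));\\".toList :=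
    pvBoth_eq _ _ (by decide)
  have eCCO : ∀ (r : Int) (nm : List Char) (sh : Int), pvOne "addc.cc.u32 ".toList r nm sh =
      "asm(\"addc.cc.u32 %0, %1,  0;\" : \"=r\"(c_loc[".toList ++ PySem.Int.toChars r ++ "]) : \"r\"(".toList ++ nm ++ "[".toList ++ PySem.Int.toChars sh ++ "]));\\".toList :=
    pvOne_eq _ _ (by decide)
  have eLO : ∀ (r : Int) (nm : List Char) (sh : Int), pvOne "addc.u32    ".toList r nm sh =
      "asm(\"addc.u32    %0, %1,  0;\" : \"=r\"(c_loc[".toList ++ PySem.Int.toChars r ++ "]) : \"r\"(".toList ++ nm ++ "[".toList ++ PySem.Int.toChars sh ++ "]));\\".toList :=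
    pvOne_eq _ _ (by decide)
  have eZ : ∀ r : Int, pvZero r =
      "asm(\"addc.u32    %0,  0,  0;\" : \"=r\"(c_loc[".toList ++ PySem.Int.toChars r ++ "]) : );\\".toList :=
    fun _ => rfl
  congr 1
  by_cases hn0 : n ≤ 0
  · rw [if_neg (show ¬ n = 1 by omega), if_neg (show ¬ n > 1 by omega),
      if_neg (show ¬ n ≥ 1 by omega)]
  · by_cases hn1 : n = 1
    · rw [if_pos hn1, if_pos (show n ≥ 1 by omega), if_pos hn1,
        PySem.List.pyRange_one_eq_nil (show min s (n - 1) ≤ 1 by omega),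
        PySem.List.pyRange_one_eq_nil (show min b (n - 1) ≤ max s 1 by omega),
        if_neg (show ¬ n > 1 by omega), eAdd]
      simp
    · have hn2 : n > 1 := by omega
      rw [if_neg hn1, if_pos hn2, if_pos (show n ≥ 1 by omega), if_pos hn2]
      simp only [if_neg hn1]
      simp only [← eAddCC, ← eCCB, ← eLB, ← eCCO, ← eLO, ← eZ]
      by_cases hr1 : s = b ∧ b = n
      · obtain ⟨hq1, hq2⟩ := hr1
        rw [if_pos ⟨hq1, hq2⟩, zone1 n (by omega),
          show min s (n - 1) = n - 1 by omega,
          PySem.List.pyRange_one_eq_nil (show min b (n - 1) ≤ max s 1 by omega),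
          if_pos (show n - 1 < s by omega)]
        simp
      · by_cases hr2 : s < b ∧ b = n
        · obtain ⟨hq1, hq2⟩ := hr2
          rw [if_neg hr1, if_pos ⟨hq1, hq2⟩, zone2 n s (by omega) (by omega),
            show min b (n - 1) = n - 1 by omega,
            if_neg (show ¬ n - 1 < s by omega), if_pos (show n - 1 < b by omega)]
        · have hq2 : b < n := by omega
          rw [if_neg hr1, if_neg hr2, if_pos ⟨hsb, hq2⟩,
            zone3 n s b (by omega) (by omega) (by omega),
            show min b (n - 1) = n - 1 by omega,
            if_neg (show ¬ n - 1 < s by omega), if_neg (show ¬ n - 1 < b by omega)]
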